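-- pv_equiv track=rewrite | github.com/Uber-Career-Prep-2023/Uber-Career-Prep-Homework-Anish-Banswada | Homework 3/FirstKBinary.py | FirstKBinary
-- ===== SOURCE A (Python) =====
-- from collections import deque
--
-- def FirstKBinary(k):
--     if (k <= 0):
--         return []
--     res = ['0']
--     queue = deque()
--     queue.append('1')
--     for i in range(k):
--         cur = queue.popleft()
--         res.append(cur)
--         queue.append(cur + '0')
--         queue.append(cur + '1')
--
--     return res[:-1]
-- ===== SOURCE B (Python) =====
-- def FirstKBinary(k):
--     return [bin(i)[2:] for i in range(k)]
-- ===== Notes on version B (the rewrite author's own statement) =====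
-- stated objective: idiomatic
-- what changed: Replaces the BFS deque that grows binary strings by appending '0'/'1' to dequeued prefixes (plus the res[:-1] trim) with a direct comprehension formatting each integer 0..k-1 via bin(i)[2:].
import Mathlib
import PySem

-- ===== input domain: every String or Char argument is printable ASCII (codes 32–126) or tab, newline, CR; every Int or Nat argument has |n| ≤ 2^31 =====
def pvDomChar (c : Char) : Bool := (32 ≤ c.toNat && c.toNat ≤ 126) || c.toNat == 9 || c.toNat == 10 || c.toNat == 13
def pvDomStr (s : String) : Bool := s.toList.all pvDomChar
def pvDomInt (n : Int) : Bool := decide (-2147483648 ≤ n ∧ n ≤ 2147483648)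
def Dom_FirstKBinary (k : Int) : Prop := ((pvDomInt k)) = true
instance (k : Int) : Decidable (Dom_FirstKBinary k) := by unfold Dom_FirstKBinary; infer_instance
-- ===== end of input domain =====

-- B replaces A's BFS deque of growing string prefixes by directly formatting each of 0..k-1 in binary (idiomatic, same cost).
-- Strings are carried as List Char (the PySem.Chars encoding) and packed with String.mk at the end.

-- ===== PORT A =====
-- the k-fold loop: state = (res, queue); popleft, append cur, push cur+'0' and cur+'1'
def loopA : Nat → List (List Char) → List (List Char) → List (List Char) × List (List Char)
  | 0, res, queue => (res, queue)
  | n+1, res, queue =>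
    match queue with
    | [] => (res, [])  -- unreachable: the deque is never empty (totalization guard only)
    | cur :: rest => loopA n (res ++ [cur]) (rest ++ [cur ++ ['0'], cur ++ ['1']])

def FirstKBinary (k : Int) : List String :=
  if k ≤ 0 then []
  else
    let st := loopA k.toNat [['0']] [['1']]
    (st.1.dropLast).map String.mk

-- ===== PORT B =====
-- bin(i)[2:] : binary digits of i, MSB first, no leading zeros ('0' for i = 0)
def binCore (n : Nat) : List Char :=
  if h : n = 0 then []
  else binCore (n / 2) ++ [if n % 2 = 1 then '1' else '0']
decreasing_by exact Nat.div_lt_self (Nat.pos_of_ne_zero h) one_lt_two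

def binStrB (n : Nat) : List Char := if n = 0 then ['0'] else binCore n

def FirstKBinary_alt (k : Int) : List String :=
  (List.range k.toNat).map (fun i => String.mk (binStrB i))

-- ===== PRECONDITION & SPEC =====
def Spec_FirstKBinary (k : Int) (out : List String) : Prop := out = FirstKBinary_alt k
instance (k : Int) (out : List String) : Decidable (Spec_FirstKBinary k out) := by unfold Spec_FirstKBinary; infer_instance

-- ===== CLAIM (what is proved, stated in full; the proofs are below) =====
def Claim_equal_FirstKBinary : Prop := ∀ (k : Int), Dom_FirstKBinary k → Spec_FirstKBinary k (FirstKBinary k)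

-- ===== LEMMAS AND PROOFS =====

lemma binCore_unfold (n : Nat) (h : n ≠ 0) :
    binCore n = binCore (n / 2) ++ [if n % 2 = 1 then '1' else '0'] := by
  rw [binCore]; simp [h]

lemma binCore_two_mul (m : Nat) (h : m ≠ 0) : binCore (2 * m) = binCore m ++ ['0'] := by
  rw [binCore_unfold (2 * m) (by omega)]
  have h2 : 2 * m / 2 = m := by omega
  have h3 : 2 * m % 2 = 0 := by omega
  simp [h2, h3]

lemma binCore_two_mul_add_one (m : Nat) : binCore (2 * m + 1) = binCore m ++ ['1'] := by
  rw [binCore_unfold (2 * m + 1) (by omega)]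
  have h2 : (2 * m + 1) / 2 = m := by omega
  have h3 : (2 * m + 1) % 2 = 1 := by omega
  simp [h2, h3]

-- loop invariant: with the queue holding binCore of s+1 .. 2s+1, n more iterations
-- append binCore of s+1 .. s+n to res and leave binCore of s+n+1 .. 2(s+n)+1 in the queue
lemma loopA_inv (n : Nat) : ∀ (s : Nat) (r : List (List Char)),
    loopA n r ((List.range' (s+1) (s+1)).map binCore)
      = (r ++ (List.range' (s+1) n).map binCore,
         (List.range' (s+n+1) (s+n+1)).map binCore) := by
  induction n with
  | zero => intro s r; simp [loopA]
  | succ n ih =>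
    intro s r
    have hq : (List.range' (s+1) (s+1)).map binCore
        = binCore (s+1) :: (List.range' (s+2) s).map binCore := by
      rw [List.range'_succ]; simp
    rw [hq]
    show loopA n (r ++ [binCore (s+1)])
        ((List.range' (s+2) s).map binCore ++ [binCore (s+1) ++ ['0'], binCore (s+1) ++ ['1']])
        = _
    have hq2 : (List.range' (s+2) s).map binCore ++ [binCore (s+1) ++ ['0'], binCore (s+1) ++ ['1']]
        = (List.range' (s+2) (s+2)).map binCore := by
      have e1 : List.range' (s+2) (s+2) = List.range' (s+2) (s+1) ++ [s+2+(s+1)] := by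
        simpa using List.range'_concat (s := s+2) (n := s+1) (step := 1)
      have e2 : List.range' (s+2) (s+1) = List.range' (s+2) s ++ [s+2+s] := by
        simpa using List.range'_concat (s := s+2) (n := s) (step := 1)
      rw [e1, e2]
      have b0 : binCore (s+2+s) = binCore (s+1) ++ ['0'] := by
        have : s+2+s = 2 * (s+1) := by omega
        rw [this, binCore_two_mul (s+1) (by omega)]
      have b1 : binCore (s+2+(s+1)) = binCore (s+1) ++ ['1'] := by
        have : s+2+(s+1) = 2 * (s+1) + 1 := by omega
        rw [this, binCore_two_mul_add_one]
      simp [b0, b1]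
    rw [hq2, ih (s+1)]
    simp only [Prod.mk.injEq]
    constructor
    · rw [List.range'_succ]; simp
    · congr 2 <;> omega

lemma range'_binCore_eq_binStrB (m : Nat) :
    (List.range' 1 m).map binCore = (List.range' 1 m).map binStrB := by
  apply List.map_congr_left
  intro i hi
  have h1 : 1 ≤ i := (List.mem_range'_1.mp hi).1
  unfold binStrB
  rw [if_neg (by omega : ¬ i = 0)]

-- ===== VERDICT (by name: the statement is the Claim_ definition above) =====
theorem FirstKBinary_spec : Claim_equal_FirstKBinary := by
  unfold Claim_equal_FirstKBinary
  intro k _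
  unfold Spec_FirstKBinary FirstKBinary FirstKBinary_alt
  by_cases hk : k ≤ 0
  · simp [hk, Int.toNat_of_nonpos hk]
  · simp only [hk, if_false]
    have hk1 : 1 ≤ k.toNat := by omega
    obtain ⟨m, hm⟩ : ∃ m, k.toNat = m + 1 := ⟨k.toNat - 1, by omega⟩
    have h1 : [(['1'] : List Char)] = (List.range' 1 1).map binCore := by
      simp [binCore_unfold 1 one_ne_zero, binCore]
    rw [hm, h1, loopA_inv (m+1) 0 [['0']]]
    have hres : ([(['0'] : List Char)] ++ (List.range' 1 (m+1)).map binCore).dropLast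
        = [['0']] ++ (List.range' 1 m).map binCore := by
      have e : List.range' 1 (m+1) = List.range' 1 m ++ [1+m] := by
        simpa using List.range'_concat (s := 1) (n := m) (step := 1)
      rw [e]
      have e2 : ([(['0'] : List Char)] ++ List.map binCore (List.range' 1 m ++ [1+m]))
          = ([['0']] ++ List.map binCore (List.range' 1 m)) ++ [binCore (1+m)] := by
        simp
      rw [e2, List.dropLast_concat]
    rw [hres]
    have hrange : List.range (m+1) = 0 :: List.range' 1 m := by
      rw [List.range_eq_range', List.range'_succ]
    rw [hrange]
    simp [binStrB, range'_binCore_eq_binStrB]
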